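-- pv_equiv track=rewrite | github.com/NielsHouben/AoC | 2024/5/main.py | fix_invalid_update
-- ===== SOURCE A (Python) =====
-- def fix_invalid_update(predecessors, update):
--     seen = set()
--     while True:
--         fixed = False
--         seen.clear()
--         for i in range(len(update)):
--             n = update[i]
--             seen.add(n)
--             rp = [p for p in predecessors.get(n, []) if p in update]
--             if not all(p in seen for p in rp):
--                 # move item to right
--                 seen.remove(n)
--                 seen.add(update[i + 1])
--                 update[i + 1], update[i] = update[i], update[i + 1]
--                 fixed = True
--         if not fixed:
--             break
--
--     return update
-- ===== SOURCE B (Python) =====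
-- def fix_invalid_update(predecessors, update):
--     whole = set(update)
--     while True:
--         moved = False
--         placed = set()
--         i = 0
--         while i < len(update):
--             n = update[i]
--             placed.add(n)
--             missing = {p for p in predecessors.get(n, []) if p in whole and p not in placed}
--             if not missing:
--                 i += 1
--                 continue
--             # n jumps directly past the furthest first occurrence of a missing predecessor
--             j = max(update.index(p, i + 1) for p in missing)
--             block = update[i + 1:j + 1]
--             update[i:j + 1] = block + [n]
--             placed.update(block)
--             i = j + 1
--             moved = True
--         if not moved:
--             break
--     return update
-- ===== Notes on version B (the rewrite author's own statement) =====
-- stated objective: faster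
-- what changed: A repeatedly bubbles each blocked element rightwards one adjacent swap at a time while maintaining a seen-set (rebuilding the relevant-predecessor list with an O(n) 'p in update' list scan per predecessor at every position of every swap); B precomputes the element set once, keeps an incremental placed-set, and moves each blocked element in a single slice rotation directly past the furthest first occurrence of a missing predecessor, skipping to the landing point.
import Mathlib
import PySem

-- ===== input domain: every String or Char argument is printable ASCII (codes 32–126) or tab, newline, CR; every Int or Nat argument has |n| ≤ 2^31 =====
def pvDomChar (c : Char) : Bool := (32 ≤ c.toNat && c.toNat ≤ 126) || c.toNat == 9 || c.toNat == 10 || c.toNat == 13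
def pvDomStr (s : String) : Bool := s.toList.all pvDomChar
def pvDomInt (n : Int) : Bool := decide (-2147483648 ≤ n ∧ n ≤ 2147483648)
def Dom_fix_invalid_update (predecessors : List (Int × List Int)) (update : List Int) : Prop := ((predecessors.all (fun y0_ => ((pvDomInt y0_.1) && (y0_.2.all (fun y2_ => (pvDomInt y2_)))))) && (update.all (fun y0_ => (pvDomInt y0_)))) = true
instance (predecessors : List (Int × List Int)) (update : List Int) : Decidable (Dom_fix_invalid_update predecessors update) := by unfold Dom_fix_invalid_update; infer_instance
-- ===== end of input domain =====

-- B replaces A's seen-set bookkeeping and one-step bubble swaps by direct block rotations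
-- (each blocked element jumps in one slice move past the furthest first occurrence of a
-- missing predecessor), with set lookups instead of A's per-predecessor list scans.
-- Both A and B rearrange `update` in place in Python; the equivalence proved here is about
-- the returned value (the mutation performed is the same rearrangement).

-- predecessors.get(n, []) — shared accessor used by both Pythons
def predsOf (predecessors : List (Int × List Int)) (n : Int) : List Int :=
  PySem.Dict.getD (PySem.Dict.mk predecessors) n []

-- ===== PORT A =====
-- one `for i in range(len(update))` pass of A; fuel = number of remaining loop iterations
def passA (P : List (Int × List Int)) : Nat → List Int → Nat → PySem.Set Int → Bool → List Int × Bool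
  | 0, u, _, _, fixed => (u, fixed)
  | fuel+1, u, i, seen, fixed =>
    if i < u.length then
      let n := u.getD i 0                                   -- update[i]: exact, 0 ≤ i < len
      let seen1 := PySem.Set.add seen n
      let rp := (predsOf P n).filter (fun p => u.contains p)
      if rp.all (fun p => PySem.Set.contains seen1 p) then
        passA P fuel u (i+1) seen1 fixed
      else
        -- update[i+1]: exact; this branch is unreachable at i = len-1 (seen then holds every
        -- element of update), so Python's update[i+1] never raises IndexError
        let m := u.getD (i+1) 0
        let seen2 := PySem.Set.add (PySem.Set.discard seen1 n) m  -- seen.remove(n): n ∈ seen1, so remove = discard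
        passA P fuel ((u.set (i+1) n).set i m) (i+1) seen2 true
    else (u, fixed)

-- the 'while True' loop, ported with fuel: a terminating Python run performs at most
-- n! + 1 < n^n + 2 passes (the pass is a function of the list alone, so a repeated list
-- state makes Python loop forever), hence fuel never cuts a run that Python finishes
def loopA (P : List (Int × List Int)) : Nat → List Int → List Int
  | 0, u => u
  | fuel+1, u =>
    let r := passA P u.length u 0 PySem.Set.empty false
    if r.2 then loopA P fuel r.1 else r.1

def fix_invalid_update (predecessors : List (Int × List Int)) (update : List Int) : List Int :=
  loopA predecessors (update.length ^ update.length + 2) update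

-- ===== PORT B =====
-- update.index(p, start): exact wherever p occurs at an index ≥ start (guaranteed at the call site)
def idxFrom (u : List Int) (start : Nat) (p : Int) : Nat :=
  match (u.drop start).idxOf? p with
  | some k => start + k
  | none => u.length

-- one pass of B; fuel = loop iterations (i strictly increases, so u.length suffices)
def passB (P : List (Int × List Int)) (whole : PySem.Set Int) : Nat → List Int → Nat → PySem.Set Int → Bool → List Int × Bool
  | 0, u, _, _, moved => (u, moved)
  | fuel+1, u, i, placed, moved =>
    if i < u.length then
      let n := u.getD i 0                                   -- update[i]: exact, 0 ≤ i < len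
      let placed1 := PySem.Set.add placed n
      let missing : PySem.Set Int :=
        PySem.Set.ofList ((predsOf P n).filter (fun p => PySem.Set.contains whole p && !PySem.Set.contains placed1 p))
      if missing.isEmpty then
        passB P whole fuel u (i+1) placed1 moved
      else
        -- max(...) over a non-empty set: order-independent, ported as a fold
        let j := (missing.map (idxFrom u (i+1))).foldl Nat.max 0
        let block := (u.drop (i+1)).take (j - i)            -- update[i+1:j+1]: exact, i+1 ≤ j+1
        let u' := u.take i ++ (block ++ [n]) ++ u.drop (j+1) -- slice assignment update[i:j+1] = block + [n]
        passB P whole fuel u' (j+1) (PySem.Set.update placed1 block) true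
    else (u, moved)

-- same outer 'while True' with the same fuel as A's port (see the comment on loopA)
def loopB (P : List (Int × List Int)) (whole : PySem.Set Int) : Nat → List Int → List Int
  | 0, u => u
  | fuel+1, u =>
    let r := passB P whole u.length u 0 PySem.Set.empty false
    if r.2 then loopB P whole fuel r.1 else r.1

def fix_invalid_update_alt (predecessors : List (Int × List Int)) (update : List Int) : List Int :=
  loopB predecessors (PySem.Set.ofList update) (update.length ^ update.length + 2) update

-- ===== PRECONDITION & SPEC =====
def Spec_fix_invalid_update (predecessors : List (Int × List Int)) (update : List Int) (out : List Int) : Prop := out = fix_invalid_update_alt predecessors update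
instance (predecessors : List (Int × List Int)) (update : List Int) (out : List Int) : Decidable (Spec_fix_invalid_update predecessors update out) := by unfold Spec_fix_invalid_update; infer_instance

-- ===== CLAIM (what is proved, stated in full; the proofs are below) =====
def Claim_equal_fix_invalid_update : Prop := ∀ (predecessors : List (Int × List Int)) (update : List Int), Dom_fix_invalid_update predecessors update → Spec_fix_invalid_update predecessors update (fix_invalid_update predecessors update)

-- ===== LEMMAS AND PROOFS =====

-- the predecessors of u[i] that occur in u but not in u[0:i+1] (what blocks position i)
def Missing (P : List (Int × List Int)) (u : List Int) (i : Nat) : List Int :=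
  (predsOf P (u.getD i 0)).filter (fun p => decide (p ∈ u) && !decide (p ∈ u.take (i+1)))

-- the landing index of a blocked element
def jOf (P : List (Int × List Int)) (u : List Int) (i : Nat) : Nat :=
  ((Missing P u i).map (idxFrom u (i+1))).foldl Nat.max 0

-- the list after the blocked element at i jumps to position j
def rotAt (u : List Int) (i j : Nat) : List Int :=
  u.take i ++ (u.drop (i+1)).take (j - i) ++ [u.getD i 0] ++ u.drop (j+1)

-- ---- foldl Nat.max toolbox ----
theorem le_foldl_max (l : List Nat) (a : Nat) : a ≤ l.foldl Nat.max a := by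
  induction l generalizing a with
  | nil => simp
  | cons x l ih => exact le_trans (Nat.le_max_left a x) (ih (Nat.max a x))

theorem mem_le_foldl_max {x : Nat} (l : List Nat) (a : Nat) (hx : x ∈ l) : x ≤ l.foldl Nat.max a := by
  induction l generalizing a with
  | nil => simp at hx
  | cons y l ih =>
    rcases List.mem_cons.mp hx with h | h
    · subst h; exact le_trans (Nat.le_max_right a x) (le_foldl_max l (Nat.max a x))
    · exact ih (Nat.max a y) h

theorem foldl_max_le (l : List Nat) (a b : Nat) (ha : a ≤ b) (h : ∀ x ∈ l, x ≤ b) : l.foldl Nat.max a ≤ b := by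
  induction l generalizing a with
  | nil => simpa using ha
  | cons x l ih =>
    exact ih (Nat.max a x) (Nat.max_le.mpr ⟨ha, h x (List.mem_cons_self)⟩)
      (fun y hy => h y (List.mem_cons_of_mem _ hy))

theorem foldl_max_congr_mem (l1 l2 : List Nat) (a : Nat) (h : ∀ x, x ∈ l1 ↔ x ∈ l2) :
    l1.foldl Nat.max a = l2.foldl Nat.max a := by
  apply le_antisymm
  · exact foldl_max_le l1 a _ (le_foldl_max l2 a)
      (fun x hx => mem_le_foldl_max l2 a ((h x).mp hx))
  · exact foldl_max_le l2 a _ (le_foldl_max l1 a)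
      (fun x hx => mem_le_foldl_max l1 a ((h x).mpr hx))

-- ---- list decomposition ----
theorem getD_cons_drop (u : List Int) (i : Nat) (h : i < u.length) :
    u = u.take i ++ u.getD i 0 :: u.drop (i+1) := by
  conv_lhs => rw [← List.take_append_drop i u]
  rw [List.drop_eq_getElem_cons h, List.getD_eq_getElem u 0 h]

theorem double_decomp (u : List Int) (i : Nat) (h : i + 1 < u.length) :
    u = u.take i ++ u.getD i 0 :: u.getD (i+1) 0 :: u.drop (i+2) := by
  conv_lhs => rw [getD_cons_drop u i (by omega)]
  rw [List.drop_eq_getElem_cons h, List.getD_eq_getElem u 0 h]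

theorem swap_eq (u : List Int) (i : Nat) (h : i + 1 < u.length) :
    (u.set (i+1) (u.getD i 0)).set i (u.getD (i+1) 0)
      = u.take i ++ u.getD (i+1) 0 :: u.getD i 0 :: u.drop (i+2) := by
  induction i generalizing u with
  | zero =>
    match u, h with
    | x :: y :: t, _ => simp [List.set, List.getD]
  | succ i ih =>
    match u, h with
    | x :: t, h =>
      have ht : i + 1 < t.length := by simpa using h
      simp only [List.set, List.getD_cons_succ, List.take_succ_cons, List.drop_succ_cons,
        List.cons_append]
      exact congrArg (x :: ·) (ih t ht)

theorem take_succ_getD (u : List Int) (i : Nat) (h : i < u.length) :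
    u.take (i+1) = u.take i ++ [u.getD i 0] := by
  rw [List.take_add_one, List.getElem?_eq_getElem h, List.getD_eq_getElem u 0 h]; rfl

theorem take_append_one (l1 l2 : List Int) (x : Int) : (l1 ++ x :: l2).take (l1.length + 1) = l1 ++ [x] := by
  rw [show l1 ++ x :: l2 = (l1 ++ [x]) ++ l2 from by simp]
  rw [show l1.length + 1 = (l1 ++ [x]).length from by simp]
  rw [List.take_left]

theorem getD_append_one (l1 l2 : List Int) (x y : Int) : (l1 ++ x :: y :: l2).getD (l1.length + 1) 0 = y := by
  simp [List.getD]

theorem mem_rot (u : List Int) (i j : Nat) (h : i < u.length) (x : Int) :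
    x ∈ u.take i ++ ((u.drop (i+1)).take (j - i) ++ [u.getD i 0]) ++ u.drop (j+1) ↔ x ∈ u := by
  have hn : u.getD i 0 ∈ u := by
    rw [List.getD_eq_getElem u 0 h]; exact List.getElem_mem h
  simp only [List.mem_append, List.mem_cons, List.not_mem_nil, or_false]
  constructor
  · rintro ((h1 | h1) | h1)
    · exact List.mem_of_mem_take h1
    · rcases h1 with h1 | h1
      · exact List.mem_of_mem_drop (List.mem_of_mem_take h1)
      · exact h1 ▸ hn
    · exact List.mem_of_mem_drop h1
  · intro hx
    rw [getD_cons_drop u i h] at hx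
    simp only [List.mem_append, List.mem_cons] at hx
    rcases hx with h1 | h1 | h1
    · exact Or.inl (Or.inl h1)
    · exact Or.inl (Or.inr (Or.inr h1))
    · rcases Nat.le_total i j with hij | hij
      · have hd : (u.drop (i+1)).drop (j - i) = u.drop (j+1) := by
          rw [List.drop_drop]; congr 1; omega
        rw [show u.drop (i+1) = (u.drop (i+1)).take (j-i) ++ (u.drop (i+1)).drop (j-i) from
          (List.take_append_drop _ _).symm, hd, List.mem_append] at h1
        rcases h1 with h1 | h1
        · exact Or.inl (Or.inr (Or.inl h1))
        · exact Or.inr h1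
      · have hd : u.drop (i+1) = (u.drop (j+1)).drop (i - j) := by
          rw [List.drop_drop]; congr 1; omega
        exact Or.inr (List.mem_of_mem_drop (hd ▸ h1))

-- ---- Set membership bridges ----
theorem contains_add_iff (s : PySem.Set Int) (x y : Int) :
    (PySem.Set.add s x).contains y = true ↔ y ∈ s ∨ y = x := by
  rw [show ((PySem.Set.add s x).contains y = true) ↔ y ∈ PySem.Set.add s x from List.contains_iff_mem]
  exact PySem.Set.mem_add s x y

theorem contains_iff (s : PySem.Set Int) (y : Int) : s.contains y = true ↔ y ∈ s :=
  List.contains_iff_mem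

-- ---- unfolding the ports one step ----
theorem passA_step_swap (P : List (Int × List Int)) (u : List Int) (i : Nat) (seen : PySem.Set Int) (fx : Bool) (fuel : Nat) (hi : i < u.length)
    (hTest : (((predsOf P (u.getD i 0)).filter (fun p => u.contains p)).all
        (fun p => PySem.Set.contains (PySem.Set.add seen (u.getD i 0)) p)) = false) :
    passA P (fuel+1) u i seen fx
      = passA P fuel ((u.set (i+1) (u.getD i 0)).set i (u.getD (i+1) 0)) (i+1)
          (PySem.Set.add (PySem.Set.discard (PySem.Set.add seen (u.getD i 0)) (u.getD i 0)) (u.getD (i+1) 0)) true := by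
  simp only [passA, hTest, if_pos hi, Bool.false_eq_true, if_false]

theorem passA_step_noswap (P : List (Int × List Int)) (u : List Int) (i : Nat) (seen : PySem.Set Int) (fx : Bool) (fuel : Nat) (hi : i < u.length)
    (hTest : (((predsOf P (u.getD i 0)).filter (fun p => u.contains p)).all
        (fun p => PySem.Set.contains (PySem.Set.add seen (u.getD i 0)) p)) = true) :
    passA P (fuel+1) u i seen fx = passA P fuel u (i+1) (PySem.Set.add seen (u.getD i 0)) fx := by
  simp only [passA, hTest, if_pos hi, if_true]

theorem passA_stop (P : List (Int × List Int)) (u : List Int) (i : Nat) (seen : PySem.Set Int) (fx : Bool) (fuel : Nat) (hi : ¬ i < u.length) :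
    passA P fuel u i seen fx = (u, fx) := by
  cases fuel <;> simp only [passA, if_neg hi]

-- A's pass tests exactly "is something still missing"
theorem testA_iff (P : List (Int × List Int)) (u : List Int) (i : Nat) (seen : PySem.Set Int)
    (hseen : ∀ x : Int, ((PySem.Set.add seen (u.getD i 0)).contains x = true) ↔ x ∈ u.take (i+1)) :
    ((((predsOf P (u.getD i 0)).filter (fun p => u.contains p)).all
        (fun p => PySem.Set.contains (PySem.Set.add seen (u.getD i 0)) p)) = true)
      ↔ Missing P u i = [] := by
  simp only [List.all_eq_true, List.mem_filter, Missing, List.eq_nil_iff_forall_not_mem,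
    Bool.and_eq_true, Bool.not_eq_true', decide_eq_true_eq, decide_eq_false_iff_not,
    List.contains_iff_mem]
  constructor
  · rintro h p ⟨hp1, hp2, hp3⟩
    exact hp3 ((hseen p).mp (h p ⟨hp1, hp2⟩))
  · intro h p hp
    rw [hseen p]
    by_contra hc
    exact h p ⟨hp.1, hp.2, hc⟩

theorem chainA (P : List (Int × List Int)) :
    ∀ (N : Nat) (u : List Int) (i : Nat) (seen : PySem.Set Int) (fx : Bool),
      u.length - i ≤ N →
      i < u.length →
      (∀ x : Int, ((PySem.Set.add seen (u.getD i 0)).contains x = true) ↔ x ∈ u.take (i+1)) →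
      Missing P u i ≠ [] →
      ∃ seen' : PySem.Set Int,
        (∀ x : Int, ((PySem.Set.add seen' (u.getD i 0)).contains x = true) ↔ x ∈ (rotAt u i (jOf P u i)).take (jOf P u i + 1)) ∧
        i + 1 ≤ jOf P u i ∧ jOf P u i + 1 ≤ u.length ∧
        Missing P (rotAt u i (jOf P u i)) (jOf P u i) = [] ∧
        (rotAt u i (jOf P u i)).getD (jOf P u i) 0 = u.getD i 0 ∧
        (rotAt u i (jOf P u i)).length = u.length ∧
        (∀ x : Int, x ∈ rotAt u i (jOf P u i) ↔ x ∈ u) ∧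
        (∀ fuel : Nat, jOf P u i - i ≤ fuel →
          passA P fuel u i seen fx
            = passA P (fuel - (jOf P u i - i)) (rotAt u i (jOf P u i)) (jOf P u i) seen' true) := by
  intro N
  induction N with
  | zero => intro u i seen fx hN hi _ _; omega
  | succ N ih =>
    intro u i seen fx hN hi hseen hM
    obtain ⟨p0, hp0⟩ := List.exists_mem_of_ne_nil _ hM
    have hp0' : p0 ∈ u ∧ p0 ∉ u.take (i+1) := by
      simp only [Missing, List.mem_filter, Bool.and_eq_true, decide_eq_true_eq,
        Bool.not_eq_true', decide_eq_false_iff_not] at hp0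
      exact ⟨hp0.2.1, hp0.2.2⟩
    have hi1 : i + 1 < u.length := by
      by_contra hle
      exact hp0'.2 (by rw [List.take_of_length_le (by omega)]; exact hp0'.1)
    have htakei_len : (u.take i).length = i := by simp [List.length_take]; omega
    have hdrop1 : u.drop (i+1) = u.getD (i+1) 0 :: u.drop (i+2) := by
      rw [List.drop_eq_getElem_cons hi1, List.getD_eq_getElem u 0 hi1]
    have hudec : u = u.take i ++ u.getD i 0 :: u.getD (i+1) 0 :: u.drop (i+2) :=
      double_decomp u i hi1
    have hswap : (u.set (i+1) (u.getD i 0)).set i (u.getD (i+1) 0)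
        = u.take i ++ u.getD (i+1) 0 :: u.getD i 0 :: u.drop (i+2) := swap_eq u i hi1
    set u1 : List Int := u.take i ++ u.getD (i+1) 0 :: u.getD i 0 :: u.drop (i+2) with hu1def
    have hu1split2 : u1 = (u.take i ++ [u.getD (i+1) 0, u.getD i 0]) ++ u.drop (i+2) := by
      rw [hu1def]; simp
    have hpre2len : (u.take i ++ [u.getD (i+1) 0, u.getD i 0]).length = i + 2 := by
      simp [htakei_len]
    have hu1getD : u1.getD (i+1) 0 = u.getD i 0 := by
      have h := getD_append_one (u.take i) (u.drop (i+2)) (u.getD (i+1) 0) (u.getD i 0)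
      rw [htakei_len] at h
      rw [hu1def]
      exact h
    have hu1len : u1.length = u.length := by
      conv_rhs => rw [hudec]
      rw [hu1def]; simp
    have hu1take2 : u1.take (i+2) = u.take i ++ [u.getD (i+1) 0, u.getD i 0] := by
      rw [hu1split2, ← hpre2len, List.take_left]
    have hu1drop2 : u1.drop (i+2) = u.drop (i+2) := by
      rw [hu1split2, ← hpre2len, List.drop_left]
    have hmemu1 : ∀ x : Int, x ∈ u1 ↔ x ∈ u := by
      intro x
      conv_rhs => rw [hudec]
      rw [hu1def]
      simp only [List.mem_append, List.mem_cons]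
      tauto
    have htake1 : u.take (i+1) = u.take i ++ [u.getD i 0] := take_succ_getD u i hi
    have hM1 : ∀ p : Int, p ∈ Missing P u1 (i+1) ↔ (p ∈ Missing P u i ∧ p ≠ u.getD (i+1) 0) := by
      intro p
      simp only [Missing, hu1getD, List.mem_filter, Bool.and_eq_true, decide_eq_true_eq,
        Bool.not_eq_true', decide_eq_false_iff_not, hmemu1 p, hu1take2, htake1,
        List.mem_append, List.mem_cons, List.not_mem_nil, or_false]
      tauto
    have hvalm : idxFrom u (i+1) (u.getD (i+1) 0) = i + 1 := by
      simp [idxFrom, hdrop1, List.idxOf?_cons]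
    have hTest : (((predsOf P (u.getD i 0)).filter (fun p => u.contains p)).all
        (fun p => PySem.Set.contains (PySem.Set.add seen (u.getD i 0)) p)) = false :=
      Bool.eq_false_iff.mpr (fun h => hM ((testA_iff P u i seen hseen).mp h))
    have hstep : ∀ fuel : Nat, passA P (fuel+1) u i seen fx
        = passA P fuel u1 (i+1)
            (PySem.Set.add (PySem.Set.discard (PySem.Set.add seen (u.getD i 0)) (u.getD i 0)) (u.getD (i+1) 0)) true := by
      intro fuel
      rw [passA_step_swap P u i seen fx fuel hi hTest, hswap]
    set seen2 : PySem.Set Int :=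
      PySem.Set.add (PySem.Set.discard (PySem.Set.add seen (u.getD i 0)) (u.getD i 0)) (u.getD (i+1) 0) with hseen2def
    have hseen2inv : ∀ x : Int, ((PySem.Set.add seen2 (u1.getD (i+1) 0)).contains x = true) ↔ x ∈ u1.take (i+1+1) := by
      intro x
      rw [hu1getD, hu1take2, contains_add_iff]
      have hx1 : x ∈ seen2 ↔ ((x ∈ u.take (i+1) ∧ x ≠ u.getD i 0) ∨ x = u.getD (i+1) 0) := by
        rw [hseen2def, PySem.Set.mem_add, PySem.Set.mem_discard]
        rw [show x ∈ PySem.Set.add seen (u.getD i 0) ↔ x ∈ u.take (i+1) from by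
          rw [← contains_iff]; exact hseen x]
      rw [hx1, htake1]
      simp only [List.mem_append, List.mem_cons, List.not_mem_nil, or_false]
      tauto
    by_cases hM1nil : Missing P u1 (i+1) = []
    · -- the chain ends after this single swap: j = i+1
      have hallm : ∀ p ∈ Missing P u i, p = u.getD (i+1) 0 := by
        intro p hp
        by_contra hne
        exact (List.eq_nil_iff_forall_not_mem.mp hM1nil p) ((hM1 p).mpr ⟨hp, hne⟩)
      have hJ : jOf P u i = i + 1 := by
        apply le_antisymm
        · apply foldl_max_le _ 0 (i+1) (by omega)
          intro v hv
          rcases List.mem_map.mp hv with ⟨p, hp, rfl⟩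
          rw [hallm p hp, hvalm]
        · apply mem_le_foldl_max
          exact List.mem_map.mpr ⟨p0, hp0, by rw [hallm p0 hp0, hvalm]⟩
      have hrotu1 : rotAt u i (i+1) = u1 := by
        unfold rotAt
        rw [show i + 1 - i = 1 from by omega, hdrop1, hu1def]
        simp
      refine ⟨seen2, ?_, ?_, ?_, ?_, ?_, ?_, ?_, ?_⟩
      · rw [hJ, hrotu1]
        intro x
        have := hseen2inv x
        rw [hu1getD] at this
        exact this
      · omega
      · rw [hJ]; omega
      · rw [hJ, hrotu1]; exact hM1nil
      · rw [hJ, hrotu1]; exact hu1getD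
      · rw [hJ, hrotu1]; exact hu1len
      · rw [hJ, hrotu1]; exact hmemu1
      · intro fuel hfuel
        rw [hJ] at hfuel ⊢
        cases fuel with
        | zero => omega
        | succ f =>
          rw [hstep f, hrotu1, show f + 1 - (i + 1 - i) = f from by omega]
    · -- the chain continues from (u1, i+1)
      have hih := ih u1 (i+1) seen2 true (by omega) (by omega) hseen2inv hM1nil
      obtain ⟨seen'', h1, h2, h3, h4, h5, h6, h7, h8⟩ := hih
      have hfne : ∀ p : Int, p ≠ u.getD (i+1) 0 → idxFrom u (i+1) p = idxFrom u1 (i+2) p := by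
        intro p hpm
        unfold idxFrom
        rw [hdrop1, hu1drop2]
        rw [List.idxOf?_cons]
        rw [show (u.getD (i+1) 0 == p) = false from by
          simp [beq_eq_false_iff_ne]; exact fun h => hpm h.symm]
        cases hc : (u.drop (i+2)).idxOf? p with
        | none => simp [hu1len]
        | some k => simp; omega
      have hJeq : jOf P u i = jOf P u1 (i+1) := by
        apply le_antisymm
        · apply foldl_max_le _ 0 _ (by omega)
          intro v hv
          rcases List.mem_map.mp hv with ⟨p, hp, rfl⟩
          by_cases hpm : p = u.getD (i+1) 0
          · rw [hpm, hvalm]; omega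
          · rw [hfne p hpm]
            exact mem_le_foldl_max _ 0 (List.mem_map.mpr ⟨p, (hM1 p).mpr ⟨hp, hpm⟩, rfl⟩)
        · apply foldl_max_le _ 0 _ (by omega)
          intro v hv
          rcases List.mem_map.mp hv with ⟨p, hp, rfl⟩
          have hp' := (hM1 p).mp hp
          rw [← hfne p hp'.2]
          exact mem_le_foldl_max _ 0 (List.mem_map.mpr ⟨p, hp'.1, rfl⟩)
      have hu1take1 : u1.take (i+1) = u.take i ++ [u.getD (i+1) 0] := by
        have h := take_append_one (u.take i) (u.getD i 0 :: u.drop (i+2)) (u.getD (i+1) 0)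
        rw [htakei_len] at h
        rw [hu1def]
        exact h
      have hu1dropJ : ∀ J : Nat, i + 2 ≤ J + 1 → u1.drop (J+1) = u.drop (J+1) := by
        intro J hJge
        rw [hu1split2]
        rw [show J + 1 = (u.take i ++ [u.getD (i+1) 0, u.getD i 0]).length + (J + 1 - (i+2)) from by
          rw [hpre2len]; omega]
        rw [List.drop_length_add_append, List.drop_drop]
        congr 1
        omega
      have hrotcomp : rotAt u1 (i+1) (jOf P u1 (i+1)) = rotAt u i (jOf P u i) := by
        rw [← hJeq]
        unfold rotAt
        rw [hu1take1, hu1getD, hu1drop2, hu1dropJ (jOf P u i) (by omega)]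
        rw [show u.drop (i+1+1) = u.drop (i+2) from rfl]
        rw [hdrop1]
        rw [show jOf P u i - i = (jOf P u i - (i+1)) + 1 from by omega]
        rw [List.take_succ_cons]
        simp [List.append_assoc]
      refine ⟨seen'', ?_, ?_, ?_, ?_, ?_, ?_, ?_, ?_⟩
      · intro x
        have := h1 x
        rw [hu1getD, hrotcomp, ← hJeq] at this
        exact this
      · omega
      · rw [hJeq]; omega
      · rw [← hrotcomp, hJeq]; exact h4
      · rw [← hrotcomp, hJeq]
        rw [h5, hu1getD]
      · rw [← hrotcomp, h6, hu1len]
      · intro x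
        rw [← hrotcomp, h7 x, hmemu1 x]
      · intro fuel hfuel
        cases fuel with
        | zero => omega
        | succ f =>
          rw [hstep f]
          rw [h8 f (by omega)]
          rw [hrotcomp, ← hJeq]
          congr 1
          omega


-- ---- unfolding port B one step ----
theorem passB_stop (P : List (Int × List Int)) (whole : PySem.Set Int) (u : List Int) (i : Nat) (placed : PySem.Set Int) (mv : Bool) (fuel : Nat) (hi : ¬ i < u.length) :
    passB P whole fuel u i placed mv = (u, mv) := by
  cases fuel <;> simp only [passB, if_neg hi]

theorem passB_step_skip (P : List (Int × List Int)) (whole : PySem.Set Int) (u : List Int) (i : Nat) (placed : PySem.Set Int) (mv : Bool) (fuel : Nat) (hi : i < u.length)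
    (hEmpty : (PySem.Set.ofList ((predsOf P (u.getD i 0)).filter
        (fun p => PySem.Set.contains whole p && !PySem.Set.contains (PySem.Set.add placed (u.getD i 0)) p)) : List Int).isEmpty = true) :
    passB P whole (fuel+1) u i placed mv = passB P whole fuel u (i+1) (PySem.Set.add placed (u.getD i 0)) mv := by
  simp only [passB, hEmpty, if_pos hi, if_true]

theorem passB_step_jump (P : List (Int × List Int)) (whole : PySem.Set Int) (u : List Int) (i : Nat) (placed : PySem.Set Int) (mv : Bool) (fuel : Nat)
    (L : List Int) (j : Nat) (hi : i < u.length)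
    (hL : L = (PySem.Set.ofList ((predsOf P (u.getD i 0)).filter
        (fun p => PySem.Set.contains whole p && !PySem.Set.contains (PySem.Set.add placed (u.getD i 0)) p)) : List Int))
    (hj : j = (L.map (idxFrom u (i+1))).foldl Nat.max 0)
    (hEmpty : L.isEmpty = false) :
    passB P whole (fuel+1) u i placed mv
      = passB P whole fuel
          (u.take i ++ (((u.drop (i+1)).take (j - i)) ++ [u.getD i 0]) ++ u.drop (j + 1))
          (j + 1)
          (PySem.Set.update (PySem.Set.add placed (u.getD i 0)) ((u.drop (i+1)).take (j - i)))
          true := by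
  subst hL hj
  simp only [passB, hEmpty, if_pos hi, Bool.false_eq_true, if_false]

theorem mainAB (P : List (Int × List Int)) (whole : PySem.Set Int) :
    ∀ (N : Nat) (u : List Int) (i : Nat) (seen placed : PySem.Set Int) (fuelA fuelB : Nat) (fx : Bool),
      u.length - i ≤ N →
      u.length - i ≤ fuelA → u.length - i ≤ fuelB →
      (∀ x : Int, x ≠ u.getD i 0 → ((seen.contains x = true) ↔ x ∈ u.take i)) →
      (∀ x : Int, (placed.contains x = true) ↔ x ∈ u.take i) →
      (∀ x : Int, whole.contains x = true ↔ x ∈ u) →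
      passA P fuelA u i seen fx = passB P whole fuelB u i placed fx := by
  intro N
  induction N with
  | zero =>
    intro u i seen placed fuelA fuelB fx hN hfA hfB _ _ _
    have hi : ¬ i < u.length := by omega
    rw [passA_stop P u i seen fx fuelA hi, passB_stop P whole u i placed fx fuelB hi]
  | succ N ih =>
    intro u i seen placed fuelA fuelB fx hN hfA hfB hseen hplaced hw
    by_cases hi : i < u.length
    · cases fuelA with
      | zero => omega
      | succ fA =>
      cases fuelB with
      | zero => omega
      | succ fB =>
      have htake1 : u.take (i+1) = u.take i ++ [u.getD i 0] := take_succ_getD u i hi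
      have hseen1 : ∀ x : Int, ((PySem.Set.add seen (u.getD i 0)).contains x = true) ↔ x ∈ u.take (i+1) := by
        intro x
        rw [contains_add_iff, htake1, List.mem_append, List.mem_singleton]
        by_cases hx : x = u.getD i 0
        · simp [hx]
        · rw [← contains_iff seen x, hseen x hx]
      have hplaced1 : ∀ x : Int, ((PySem.Set.add placed (u.getD i 0)).contains x = true) ↔ x ∈ u.take (i+1) := by
        intro x
        rw [contains_add_iff, htake1, List.mem_append, List.mem_singleton, ← contains_iff placed x, hplaced x]
      have hfilter : (predsOf P (u.getD i 0)).filter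
          (fun p => PySem.Set.contains whole p && !PySem.Set.contains (PySem.Set.add placed (u.getD i 0)) p)
          = Missing P u i := by
        unfold Missing
        apply List.filter_congr
        intro p _
        rw [Bool.eq_iff_iff]
        simp only [Bool.and_eq_true, Bool.not_eq_true', decide_eq_true_eq,
          ← Bool.not_eq_true]
        rw [show (PySem.Set.contains whole p = true) ↔ p ∈ u from hw p,
          show (PySem.Set.contains (PySem.Set.add placed (u.getD i 0)) p = true) ↔ p ∈ u.take (i+1) from hplaced1 p]
    
      by_cases hMiss : Missing P u i = []
      · -- both sides step to i+1 without moving anything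
        rw [passA_step_noswap P u i seen fx fA hi ((testA_iff P u i seen hseen1).mpr hMiss)]
        rw [passB_step_skip P whole u i placed fx fB hi (by rw [hfilter, hMiss]; rfl)]
        apply ih u (i+1) _ _ fA fB fx (by omega) (by omega) (by omega) _ _ hw
        · intro x _
          rw [show (PySem.Set.contains (PySem.Set.add seen (u.getD i 0)) x = true) ↔ x ∈ u.take (i+1) from hseen1 x]
        · intro x
          rw [show (PySem.Set.contains (PySem.Set.add placed (u.getD i 0)) x = true) ↔ x ∈ u.take (i+1) from hplaced1 x]
      · -- blocked: A bubbles a chain of swaps, B jumps in one rotation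
        obtain ⟨seen', hs1, hji, hjlen, hMrot, hgetD, hlenrot, hmemrot, hrun⟩ :=
          chainA P (N+1) u i seen fx hN hi hseen1 hMiss
        have hJB : ((PySem.Set.ofList (Missing P u i) : List Int).map (idxFrom u (i+1))).foldl Nat.max 0 = jOf P u i := by
          unfold jOf
          apply foldl_max_congr_mem
          intro x
          constructor
          · rintro hx
            rcases List.mem_map.mp hx with ⟨p, hp, rfl⟩
            exact List.mem_map.mpr ⟨p, (PySem.Set.mem_ofList _ p).mp hp, rfl⟩
          · rintro hx
            rcases List.mem_map.mp hx with ⟨p, hp, rfl⟩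
            exact List.mem_map.mpr ⟨p, (PySem.Set.mem_ofList _ p).mpr hp, rfl⟩
        have hEmpty : (PySem.Set.ofList ((predsOf P (u.getD i 0)).filter
            (fun p => PySem.Set.contains whole p && !PySem.Set.contains (PySem.Set.add placed (u.getD i 0)) p)) : List Int).isEmpty = false := by
          rw [hfilter]
          rcases List.exists_mem_of_ne_nil _ hMiss with ⟨p, hp⟩
          have hmem : p ∈ (PySem.Set.ofList (Missing P u i) : List Int) := (PySem.Set.mem_ofList _ p).mpr hp
          have hne : (PySem.Set.ofList (Missing P u i) : List Int) ≠ [] := by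
            intro h0; rw [h0] at hmem; simp at hmem
          rw [← Bool.not_eq_true, List.isEmpty_iff]
          exact hne
        rw [passB_step_jump P whole u i placed fx fB (PySem.Set.ofList (Missing P u i)) (jOf P u i) hi
          (by rw [hfilter]) (by rw [hJB]) (by rw [hfilter] at hEmpty; exact hEmpty)]
        rw [hrun (fA+1) (by omega)]
        have hfuel1 : fA + 1 - (jOf P u i - i) = (fA - (jOf P u i - i)) + 1 := by omega
        rw [hfuel1]
        rw [passA_step_noswap P (rotAt u i (jOf P u i)) (jOf P u i) seen' true (fA - (jOf P u i - i)) (by omega)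
          ((testA_iff P (rotAt u i (jOf P u i)) (jOf P u i) seen' (by rw [hgetD]; exact hs1)).mpr hMrot)]
        have hrot_eq : rotAt u i (jOf P u i)
            = u.take i ++ (((u.drop (i+1)).take (jOf P u i - i)) ++ [u.getD i 0]) ++ u.drop (jOf P u i + 1) := by
          unfold rotAt
          simp [List.append_assoc]
        have hrottake : (rotAt u i (jOf P u i)).take (jOf P u i + 1)
            = u.take i ++ (u.drop (i+1)).take (jOf P u i - i) ++ [u.getD i 0] := by
          unfold rotAt
          rw [show u.take i ++ (u.drop (i+1)).take (jOf P u i - i) ++ [u.getD i 0] ++ u.drop (jOf P u i + 1)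
              = (u.take i ++ (u.drop (i+1)).take (jOf P u i - i) ++ [u.getD i 0]) ++ u.drop (jOf P u i + 1) by
            simp [List.append_assoc]]
          have hlenpre : (u.take i ++ (u.drop (i+1)).take (jOf P u i - i) ++ [u.getD i 0]).length = jOf P u i + 1 := by
            simp [List.length_take, List.length_drop]
            omega
          rw [← hlenpre, List.take_left]
        rw [← hrot_eq]
        apply ih (rotAt u i (jOf P u i)) (jOf P u i + 1) _ _ _ fB true
          (by omega) (by omega) (by omega)
        · intro x _
          rw [show (PySem.Set.contains (PySem.Set.add seen' ((rotAt u i (jOf P u i)).getD (jOf P u i) 0)) x = true)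
              ↔ x ∈ (rotAt u i (jOf P u i)).take (jOf P u i + 1) from by rw [hgetD]; exact hs1 x]
        · intro x
          rw [contains_iff, PySem.Set.mem_update, hrottake]
          rw [show ((PySem.Set.add placed (u.getD i 0) : PySem.Set Int) : List Int) = (PySem.Set.add placed (u.getD i 0) : PySem.Set Int) from rfl]
          rw [show x ∈ (PySem.Set.add placed (u.getD i 0) : PySem.Set Int) ↔ x ∈ u.take (i+1) from by
            rw [← contains_iff]; exact hplaced1 x]
          rw [htake1]
          simp only [List.mem_append, List.mem_singleton]
          tauto
        · intro x
          rw [hw x]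
          exact (hmemrot x).symm
    · rw [passA_stop P u i seen fx fuelA hi, passB_stop P whole u i placed fx fuelB hi]


theorem passB_mem (P : List (Int × List Int)) (whole : PySem.Set Int) :
    ∀ (fuel : Nat) (u : List Int) (i : Nat) (placed : PySem.Set Int) (mv : Bool) (x : Int),
      x ∈ (passB P whole fuel u i placed mv).1 ↔ x ∈ u := by
  intro fuel
  induction fuel with
  | zero => intro u i placed mv x; simp [passB]
  | succ fuel ih =>
    intro u i placed mv x
    simp only [passB]
    split
    · next hlen =>
      split
      · exact ih u (i+1) _ mv x
      · rw [ih _ _ _ _ x]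
        exact mem_rot u i _ hlen x
    · simp

theorem loops_eq (P : List (Int × List Int)) (whole : PySem.Set Int) :
    ∀ (fuel : Nat) (u : List Int),
      (∀ x : Int, whole.contains x = true ↔ x ∈ u) →
      loopA P fuel u = loopB P whole fuel u := by
  intro fuel
  induction fuel with
  | zero => intro u _; rfl
  | succ fuel ih =>
    intro u hw
    have hpass : passA P u.length u 0 PySem.Set.empty false
        = passB P whole u.length u 0 PySem.Set.empty false := by
      apply mainAB P whole u.length u 0 _ _ u.length u.length false (by omega) (by omega) (by omega)
      · intro x _; simp [PySem.Set.empty]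
      · intro x; simp [PySem.Set.empty]
      · exact hw
    simp only [loopA, loopB, ← hpass]
    split
    · apply ih
      intro x
      rw [hw x]
      rw [hpass]
      exact (passB_mem P whole u.length u 0 PySem.Set.empty false x).symm
    · rfl

-- ===== VERDICT (by name: the statement is the Claim_ definition above) =====
theorem fix_invalid_update_spec : Claim_equal_fix_invalid_update := by
  intro P u _
  unfold Spec_fix_invalid_update fix_invalid_update fix_invalid_update_alt
  apply loops_eq P (PySem.Set.ofList u) _ u
  intro x
  rw [contains_iff]
  exact PySem.Set.mem_ofList u x
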